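-- pv_equiv track=rewrite | github.com/YuriiSalyha/lab1 | inventory/arb_opportunity_logger.py | records_to_table_rows
-- ===== SOURCE A (Python) =====
-- from typing import Any, Literal
--
-- def records_to_table_rows(snapshot: dict[str, Any]) -> list[list[str]]:
--     """
--     Build display rows from :meth:`inventory.tracker.InventoryTracker.snapshot` (for tests / CLI).
--     """
--     rows: list[list[str]] = []
--     venues = snapshot.get("venues") or {}
--     for vname, assets in sorted(venues.items()):
--         for asset, amap in sorted(assets.items()):
--             if not isinstance(amap, dict):
--                 continue
--             rows.append(
--                 [
--                     vname,
--                     asset,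
--                     str(amap.get("free", "")),
--                     str(amap.get("locked", "")),
--                     str(amap.get("total", "")),
--                 ],
--             )
--     return rows
-- ===== SOURCE B (Python) =====
-- def records_to_table_rows(snapshot):
--     """
--     Build display rows: flatten all (venue, asset, amap) triples once,
--     do ONE global sort by (venue, asset), then format in a single pass.
--     """
--     venues = snapshot.get("venues") or {}
--     flat = [
--         (vname, asset, amap)
--         for vname, assets in venues.items()
--         for asset, amap in assets.items()
--         if isinstance(amap, dict)
--     ]
--     flat.sort(key=lambda t: (t[0], t[1]))
--     return [
--         [
--             vname,
--             asset,
--             str(amap.get("free", "")),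
--             str(amap.get("locked", "")),
--             str(amap.get("total", "")),
--         ]
--         for vname, asset, amap in flat
--     ]
-- ===== Notes on version B (the rewrite author's own statement) =====
-- stated objective: alternative
-- what changed: Replaces the two nested sorted() loops appending rows with flattening all (venue, asset, amap) triples, one global sort keyed on (venue, asset), and a single formatting pass.
import Mathlib
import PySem

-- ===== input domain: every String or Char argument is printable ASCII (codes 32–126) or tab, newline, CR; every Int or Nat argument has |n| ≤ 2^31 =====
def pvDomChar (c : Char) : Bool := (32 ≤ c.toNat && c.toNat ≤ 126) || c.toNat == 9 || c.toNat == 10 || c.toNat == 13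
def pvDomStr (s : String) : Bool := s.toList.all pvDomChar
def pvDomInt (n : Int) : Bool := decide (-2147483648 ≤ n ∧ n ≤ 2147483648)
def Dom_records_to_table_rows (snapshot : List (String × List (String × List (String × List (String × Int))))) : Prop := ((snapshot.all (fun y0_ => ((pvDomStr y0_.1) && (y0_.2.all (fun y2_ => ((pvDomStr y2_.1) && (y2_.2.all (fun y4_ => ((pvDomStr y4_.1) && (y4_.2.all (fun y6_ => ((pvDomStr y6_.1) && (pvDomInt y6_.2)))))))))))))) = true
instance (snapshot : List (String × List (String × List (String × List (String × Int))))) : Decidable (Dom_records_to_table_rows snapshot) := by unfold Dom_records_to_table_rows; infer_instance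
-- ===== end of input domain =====

-- B replaces A's two nested sorted loops by flatten + one global (venue, asset) sort + a formatting pass (alternative decomposition, same cost); equivalence proved on all typed inputs.


-- str(amap.get(k, "")) : the value is an int (→ str(n)) or the default "" (→ "")
def pvCell (o : Option Int) : String :=
  match o with
  | some n => PySem.Int.toStr n
  | none => ""

-- ===== PORT A =====
def records_to_table_rows (snapshot : List (String × List (String × List (String × List (String × Int))))) : List (List String) :=
  -- venues = snapshot.get("venues") or {} : a missing key gives {}, and an empty dict is already []
  let venues := ((PySem.Dict.ofList snapshot).get? "venues").getD []
  -- sorted(venues.items()) / sorted(assets.items()): dict keys are distinct, so Python's pair sort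
  -- only ever compares the keys → key = fst is exact; isinstance(amap, dict) always holds under
  -- the type convention, so the 'continue' branch never fires.
  (PySem.List.sorted (PySem.Dict.ofList venues).items (fun p => p.1)).foldl
    (fun rows va =>
      (PySem.List.sorted (PySem.Dict.ofList va.2).items (fun p => p.1)).foldl
        (fun rows am =>
          let d := PySem.Dict.ofList am.2
          rows ++ [[va.1, am.1, pvCell (d.get? "free"), pvCell (d.get? "locked"), pvCell (d.get? "total")]])
        rows)
    []

-- ===== PORT B =====
-- the final formatting pass of Source B, applied to one flat triple (vname, asset, amap)
def pvRowOf (t : String × String × List (String × Int)) : List String :=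
  let d := PySem.Dict.ofList t.2.2
  [t.1, t.2.1, pvCell (d.get? "free"), pvCell (d.get? "locked"), pvCell (d.get? "total")]

def records_to_table_rows_alt (snapshot : List (String × List (String × List (String × List (String × Int))))) : List (List String) :=
  let venues := ((PySem.Dict.ofList snapshot).get? "venues").getD []
  -- flatten: all (vname, asset, amap) triples (every amap is a dict under the type convention)
  let flat := (PySem.Dict.ofList venues).items.flatMap
      (fun va => (PySem.Dict.ofList va.2).items.map (fun am => (va.1, am.1, am.2)))
  -- one global sort by the tuple key (t[0], t[1]) = lexicographic (vname, asset)
  (PySem.List.sorted flat (fun t => toLex (t.1, t.2.1))).map pvRowOf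

-- ===== PRECONDITION & SPEC =====
def Spec_records_to_table_rows (snapshot : List (String × List (String × List (String × List (String × Int))))) (out : List (List String)) : Prop := out = records_to_table_rows_alt snapshot
instance (snapshot : List (String × List (String × List (String × List (String × Int))))) (out : List (List String)) : Decidable (Spec_records_to_table_rows snapshot out) := by unfold Spec_records_to_table_rows; infer_instance

-- ===== CLAIM (what is proved, stated in full; the proofs are below) =====
def Claim_equal_records_to_table_rows : Prop := ∀ (snapshot : List (String × List (String × List (String × List (String × Int))))), Dom_records_to_table_rows snapshot → Spec_records_to_table_rows snapshot (records_to_table_rows snapshot)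

-- ===== LEMMAS AND PROOFS =====

-- sorted dict items are strictly increasing in their (distinct) keys
lemma pv_sorted_items_fst_lt {ν : Type} (d : List (String × ν)) :
    ((PySem.List.sorted (PySem.Dict.ofList d).items (fun p => p.1))).Pairwise
      (fun a b => a.1 < b.1) := by
  have hle := PySem.List.sorted_pairwise (xs := (PySem.Dict.ofList d).items)
    (key := fun p : String × ν => p.1)
  have hperm : (PySem.List.sorted (PySem.Dict.ofList d).items (fun p : String × ν => p.1)).Perm
      (PySem.Dict.ofList d).items := PySem.List.sorted_perm _ _ _
  have hnd : ((PySem.List.sorted (PySem.Dict.ofList d).items (fun p : String × ν => p.1)).map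
      (fun p => p.1)).Nodup := by
    refine (hperm.map (fun p : String × ν => p.1)).nodup_iff.mpr ?_
    have := PySem.Dict.nodup_keys_ofList (κ := String) d
    simpa [PySem.Dict.keys] using this
  have hne : (PySem.List.sorted (PySem.Dict.ofList d).items (fun p : String × ν => p.1)).Pairwise
      (fun a b => a.1 ≠ b.1) := by
    simpa [List.Nodup, List.pairwise_map] using hnd
  exact (hle.and hne).imp (fun h => lt_of_le_of_ne h.1 h.2)

-- the one global (vname, asset)-lex sort equals the flatMap of the two nested key sorts
lemma pv_key_sorted_eq (venues : List (String × List (String × List (String × Int)))) :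
    PySem.List.sorted
        ((PySem.Dict.ofList venues).items.flatMap
          (fun va => (PySem.Dict.ofList va.2).items.map (fun am => (va.1, am.1, am.2))))
        (fun t => toLex (t.1, t.2.1))
      = (PySem.List.sorted (PySem.Dict.ofList venues).items (fun p => p.1)).flatMap
          (fun va => (PySem.List.sorted (PySem.Dict.ofList va.2).items (fun p => p.1)).map
            (fun am => (va.1, am.1, am.2))) := by
  apply PySem.List.sorted_eq_of_perm_of_pairwise_lt
  · exact (PySem.List.sorted_perm _ _ _).flatMap
      (fun va _ => (PySem.List.sorted_perm _ _ _).map _)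
  · refine List.pairwise_flatMap.mpr ⟨?_, ?_⟩
    · intro va _
      refine List.pairwise_map.mpr ((pv_sorted_items_fst_lt va.2).imp ?_)
      intro a b h
      exact Prod.Lex.toLex_lt_toLex.mpr (Or.inr ⟨rfl, h⟩)
    · refine (pv_sorted_items_fst_lt venues).imp ?_
      intro a b h x hx y hy
      simp only [List.mem_map] at hx hy
      obtain ⟨am, _, rfl⟩ := hx
      obtain ⟨am', _, rfl⟩ := hy
      exact Prod.Lex.toLex_lt_toLex.mpr (Or.inl h)

theorem records_to_table_rows_spec : Claim_equal_records_to_table_rows := by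
  intro snapshot _
  show records_to_table_rows snapshot = records_to_table_rows_alt snapshot
  simp only [records_to_table_rows, records_to_table_rows_alt]
  rw [pv_key_sorted_eq, List.map_flatMap]
  have inner : ∀ (va : String × List (String × List (String × Int))) (rows : List (List String)),
      (PySem.List.sorted (PySem.Dict.ofList va.2).items (fun p => p.1)).foldl
        (fun rows am =>
          rows ++ [[va.1, am.1, pvCell ((PySem.Dict.ofList am.2).get? "free"),
                    pvCell ((PySem.Dict.ofList am.2).get? "locked"),
                    pvCell ((PySem.Dict.ofList am.2).get? "total")]]) rows
      = rows ++ (PySem.List.sorted (PySem.Dict.ofList va.2).items (fun p => p.1)).map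
          (fun am => pvRowOf (va.1, am.1, am.2)) := fun va rows =>
    PySem.List.foldl_append_singleton_eq_map
      (fun (am : String × List (String × Int)) => pvRowOf (va.1, am.1, am.2)) _ rows
  rw [show (fun (rows : List (List String)) (va : String × List (String × List (String × Int))) =>
      (PySem.List.sorted (PySem.Dict.ofList va.2).items (fun p => p.1)).foldl
        (fun (rows : List (List String)) (am : String × List (String × Int)) =>
          rows ++ [[va.1, am.1, pvCell ((PySem.Dict.ofList am.2).get? "free"),
                    pvCell ((PySem.Dict.ofList am.2).get? "locked"),
                    pvCell ((PySem.Dict.ofList am.2).get? "total")]]) rows)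
    = (fun rows va => rows ++ (PySem.List.sorted (PySem.Dict.ofList va.2).items (fun p => p.1)).map
          (fun am => pvRowOf (va.1, am.1, am.2)))
    from funext fun rows => funext fun va => inner va rows]
  rw [PySem.List.foldl_append_eq_flatMap]
  simp [List.map_map, Function.comp_def]
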